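-- pv_equiv track=rewrite | github.com/NAMITHA-L/Gender-Bias-Analysis | 04_tag_stereotypes.py | tag_bias
-- ===== SOURCE A (Python) =====
-- from collections import Counter
--
-- bias_categories = {
--     "appearance": ["beautiful", "sexy", "pretty", "young", "hot", "attractive", "lovely"],
--     "agency": ["strong", "brave", "decides", "leads", "runs", "fights", "wins", "saves"],
--     "relationship": ["wife", "mother", "daughter", "sister", "girlfriend"],
--     "emotion": ["emotional", "caring", "crying", "angry", "upset", "nervous", "happy", "loving"]
-- }
--
-- def tag_bias(words):
--     category_counts = Counter()
--     for word in words: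
--         found = False
--         for category, keywords in bias_categories.items():
--             if word in keywords:
--                 category_counts[category] += 1
--                 found = True
--                 break
--         if not found:
--             category_counts["other"] += 1
--     return category_counts
-- ===== SOURCE B (Python) =====
-- from collections import Counter
--
-- bias_categories = {
--     "appearance": ["beautiful", "sexy", "pretty", "young", "hot", "attractive", "lovely"],
--     "agency": ["strong", "brave", "decides", "leads", "runs", "fights", "wins", "saves"],
--     "relationship": ["wife", "mother", "daughter", "sister", "girlfriend"],
--     "emotion": ["emotional", "caring", "crying", "angry", "upset", "nervous", "happy", "loving"]
-- }
--
-- # Flat keyword -> category index, built once: one dict lookup per word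
-- # replaces A's inner scan over the categories.
-- _keyword_to_category = {
--     kw: cat for cat, kws in bias_categories.items() for kw in kws
-- }
--
-- def tag_bias(words):
--     return Counter(_keyword_to_category.get(w, "other") for w in words)
-- ===== Notes on version B (the rewrite author's own statement) =====
-- stated objective: idiomatic
-- what changed: B builds a flat keyword-to-category dict once and returns Counter(index.get(w, 'other') for w in words), replacing A's per-word inner scan over the categories with its found flag and break by a single indexed pass.
import Mathlib
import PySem

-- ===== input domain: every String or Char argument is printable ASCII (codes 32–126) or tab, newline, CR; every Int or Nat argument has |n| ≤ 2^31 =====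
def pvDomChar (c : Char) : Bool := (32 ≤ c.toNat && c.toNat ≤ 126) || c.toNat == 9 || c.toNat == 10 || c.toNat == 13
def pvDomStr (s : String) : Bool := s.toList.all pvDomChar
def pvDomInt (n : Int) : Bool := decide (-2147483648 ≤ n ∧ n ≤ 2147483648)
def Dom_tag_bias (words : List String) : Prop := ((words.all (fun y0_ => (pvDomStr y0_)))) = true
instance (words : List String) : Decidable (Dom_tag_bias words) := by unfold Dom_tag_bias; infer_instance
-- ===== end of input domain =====

-- B replaces A's per-word scan over the categories (with a found flag and break) by a
-- flat keyword→category dict built once and a Counter over the mapped words (idiomatic).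

-- ===== PORT A =====
def pvBiasCategories : List (String × List String) :=
  [("appearance", ["beautiful", "sexy", "pretty", "young", "hot", "attractive", "lovely"]),
   ("agency", ["strong", "brave", "decides", "leads", "runs", "fights", "wins", "saves"]),
   ("relationship", ["wife", "mother", "daughter", "sister", "girlfriend"]),
   ("emotion", ["emotional", "caring", "crying", "angry", "upset", "nervous", "happy", "loving"])]

-- A's inner 'for category, keywords … break' loop: returns the updated counter and the found flag
def pvScanCats (counts : PySem.Dict String Int) (word : String) :
    List (String × List String) → PySem.Dict String Int × Bool
  | [] => (counts, false)
  | (cat, kws) :: rest =>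
      if word ∈ kws then (counts.modify cat 0 (· + 1), true)
      else pvScanCats counts word rest

def tag_bias (words : List String) : List (String × Int) :=
  (words.foldl (fun counts word =>
      let r := pvScanCats counts word pvBiasCategories
      if !r.2 then r.1.modify "other" 0 (· + 1) else r.1)
    PySem.Dict.empty).items

-- ===== PORT B =====
-- the dict comprehension {kw: cat for cat, kws in bias_categories.items() for kw in kws}
def pvKeywordToCategory : PySem.Dict String String :=
  PySem.Dict.ofList (pvBiasCategories.flatMap (fun p => p.2.map (fun kw => (kw, p.1))))

def tag_bias_alt (words : List String) : List (String × Int) :=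
  (PySem.Dict.counter (words.map (fun w => (pvKeywordToCategory.get? w).getD "other"))).items

-- ===== PRECONDITION & SPEC =====
def Spec_tag_bias (words : List String) (out : List (String × Int)) : Prop := out = tag_bias_alt words
instance (words : List String) (out : List (String × Int)) : Decidable (Spec_tag_bias words out) := by unfold Spec_tag_bias; infer_instance

-- ===== CLAIM (what is proved, stated in full; the proofs are below) =====
def Claim_equal_tag_bias : Prop := ∀ (words : List String), Dom_tag_bias words → Spec_tag_bias words (tag_bias words)

-- ===== LEMMAS AND PROOFS =====

-- the 28 keywords, in scan order
def pvAllKeywords : List String :=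
  ["beautiful", "sexy", "pretty", "young", "hot", "attractive", "lovely",
   "strong", "brave", "decides", "leads", "runs", "fights", "wins", "saves",
   "wife", "mother", "daughter", "sister", "girlfriend",
   "emotional", "caring", "crying", "angry", "upset", "nervous", "happy", "loving"]

theorem pvKeys_index : pvKeywordToCategory.keys = pvAllKeywords := by decide

-- per-word step agreement: A's inner scan does exactly what one index lookup does
theorem pvStep_eq (counts : PySem.Dict String Int) (word : String) :
    (let r := pvScanCats counts word pvBiasCategories
     if !r.2 then r.1.modify "other" 0 (· + 1) else r.1)
    = counts.modify ((pvKeywordToCategory.get? word).getD "other") 0 (· + 1) := by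
  by_cases hw : word ∈ pvAllKeywords
  · fin_cases hw <;> rfl
  · have hnone : pvKeywordToCategory.get? word = none := by
      rw [PySem.Dict.get?_eq_none_iff_not_mem_keys, pvKeys_index]; exact hw
    simp only [pvAllKeywords, List.mem_cons, not_or] at hw
    obtain ⟨h1,h2,h3,h4,h5,h6,h7,h8,h9,h10,h11,h12,h13,h14,h15,h16,h17,h18,h19,h20,h21,h22,h23,h24,h25,h26,h27,h28,_⟩ := hw
    simp [pvScanCats, pvBiasCategories, hnone,
      h1,h2,h3,h4,h5,h6,h7,h8,h9,h10,h11,h12,h13,h14,h15,h16,h17,h18,h19,h20,h21,h22,h23,h24,h25,h26,h27,h28]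

-- ===== VERDICT (by name: the statement is the Claim_ definition above) =====
theorem tag_bias_spec : Claim_equal_tag_bias := by
  intro words _
  unfold Spec_tag_bias tag_bias tag_bias_alt
  rw [PySem.Dict.counter_eq_foldl, List.foldl_map]
  congr 1
  congr 1
  funext c w
  exact pvStep_eq c w
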